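-- pv_equiv track=rewrite | github.com/JackScher/yellowstone_tasks | task3.py | get_variety_list_function
-- ===== SOURCE A (Python) =====
-- def get_variety_list_function(file):
--     variety_list = file['variety']
--     check_name = ''
--     start = 0
--     finish = 0
--     res_dict = {}
--     for iteration in range(0, len(variety_list)):
--         if check_name != variety_list[iteration]:
--             start = iteration
--             check_name = variety_list[iteration]
--         if check_name == variety_list[iteration]:
--             finish = iteration
--             res_dict[check_name] = [start, finish]
--     return res_dict
-- ===== SOURCE B (Python) =====
-- def get_variety_list_function(file):
--     variety_list = file['variety']
--     res_dict = {}
--     idx = 0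
--     n = len(variety_list)
--     while idx < n:
--         name = variety_list[idx]
--         j = idx + 1
--         while j < n and variety_list[j] == name:
--             j += 1
--         res_dict[name] = [idx, j - 1]
--         idx = j
--     return res_dict
-- ===== Notes on version B (the rewrite author's own statement) =====
-- stated objective: alternative
-- what changed: B replaces A's per-index sentinel/state loop (check_name, start, finish, one dict write per element) with a two-level run scanner: an inner while advances to the end of each contiguous run and the dict is written once per run with [start, end] computed by index arithmetic.
-- outside the precondition, e.g. on get_variety_list_function({}): A raises KeyError, B raises KeyError
import Mathlib
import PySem

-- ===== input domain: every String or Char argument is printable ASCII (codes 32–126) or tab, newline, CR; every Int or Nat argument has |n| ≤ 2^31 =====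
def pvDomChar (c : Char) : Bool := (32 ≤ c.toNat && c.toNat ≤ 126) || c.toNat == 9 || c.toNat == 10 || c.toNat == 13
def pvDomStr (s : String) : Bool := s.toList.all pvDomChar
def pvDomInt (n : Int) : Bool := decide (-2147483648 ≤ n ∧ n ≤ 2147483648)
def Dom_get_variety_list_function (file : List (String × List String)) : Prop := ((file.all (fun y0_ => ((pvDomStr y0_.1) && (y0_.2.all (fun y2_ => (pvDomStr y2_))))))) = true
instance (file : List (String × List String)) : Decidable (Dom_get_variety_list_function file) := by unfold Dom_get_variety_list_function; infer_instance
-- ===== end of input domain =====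

-- B replaces A's per-index sentinel/state loop with a run scanner (inner while per contiguous
-- run, one dict write per run); equal return value wherever the Python A returns (Pre_: key present).

-- ===== PORT A =====
-- loop body of A, named for the fold (state = (check_name, start, finish, res_dict))
def pvAStep (variety_list : List String) (st : String × Int × Int × PySem.Dict String (List Int)) (iteration : Int) : String × Int × Int × PySem.Dict String (List Int) :=
  let cur := PySem.List.pyGetD variety_list iteration ""
  let cs := if st.1 ≠ cur then (cur, iteration) else (st.1, st.2.1)
  if cs.1 = cur then (cs.1, cs.2, iteration, (st.2.2.2).insert cs.1 [cs.2, iteration])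
  else (cs.1, cs.2, st.2.2.1, st.2.2.2)

def get_variety_list_function (file : List (String × List String)) : List (String × List Int) :=
  match (PySem.Dict.mk file).get? "variety" with
  | none => []   -- Python raises KeyError here; excluded by Pre_
  | some variety_list =>
      ((PySem.List.pyRange 0 (variety_list.length : Int) 1).foldl (pvAStep variety_list)
        ("", 0, 0, PySem.Dict.empty)).2.2.2.items

-- ===== PORT B =====
-- the inner while loop of Source B ('while j < n and variety_list[j] == name: j += 1');
-- the fuel argument (called with vl.length, never exhausted) only makes it total
def pvRunEnd (vl : List String) (name : String) (fuel j : Nat) : Nat :=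
  match fuel with
  | 0 => j
  | fuel' + 1 =>
      if h : j < vl.length then
        if vl[j] = name then pvRunEnd vl name fuel' (j + 1) else j
      else j

-- the outer while loop of Source B; same fuel convention
def pvBLoop (vl : List String) (fuel idx : Nat) (res : PySem.Dict String (List Int)) : PySem.Dict String (List Int) :=
  match fuel with
  | 0 => res
  | fuel' + 1 =>
      if h : idx < vl.length then
        let j := pvRunEnd vl vl[idx] vl.length (idx + 1)
        pvBLoop vl fuel' j (res.insert vl[idx] [(idx : Int), (j : Int) - 1])
      else res

def get_variety_list_function_alt (file : List (String × List String)) : List (String × List Int) :=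
  match (PySem.Dict.mk file).get? "variety" with
  | none => []   -- Python raises KeyError here; excluded by Pre_
  | some variety_list => (pvBLoop variety_list variety_list.length 0 PySem.Dict.empty).items

-- ===== PRECONDITION & SPEC =====
-- Pre_: the argument dict has a 'variety' key; otherwise the Python A raises KeyError.
def Pre_get_variety_list_function (file : List (String × List String)) : Prop :=
  ((PySem.Dict.mk file).get? "variety").isSome = true
instance (file : List (String × List String)) : Decidable (Pre_get_variety_list_function file) := by unfold Pre_get_variety_list_function; infer_instance

def pvWitness_get_variety_list_function : (List (String × List String)) := [("variety", ["a", "a", "b"])]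

def Spec_get_variety_list_function (file : List (String × List String)) (out : List (String × List Int)) : Prop := out = get_variety_list_function_alt file
instance (file : List (String × List String)) (out : List (String × List Int)) : Decidable (Spec_get_variety_list_function file out) := by unfold Spec_get_variety_list_function; infer_instance

-- ===== CLAIM (what is proved, stated in full; the proofs are below) =====
def Claim_equal_get_variety_list_function : Prop := ∀ (file : List (String × List String)), Dom_get_variety_list_function file → Pre_get_variety_list_function file → Spec_get_variety_list_function file (get_variety_list_function file)

-- ===== LEMMAS AND PROOFS =====

theorem pvRunEnd_ge (vl : List String) (name : String) (fuel : Nat) :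
    ∀ j : Nat, j ≤ pvRunEnd vl name fuel j := by
  induction fuel with
  | zero => intro j; simp [pvRunEnd]
  | succ fuel ih =>
      intro j
      rw [pvRunEnd]
      split_ifs with h1 h2
      · exact le_trans (by omega) (ih (j + 1))
      · exact le_refl j
      · exact le_refl j

theorem pvRunEnd_le (vl : List String) (name : String) (fuel : Nat) :
    ∀ j : Nat, j ≤ vl.length → pvRunEnd vl name fuel j ≤ vl.length := by
  induction fuel with
  | zero => intro j hj; simpa [pvRunEnd] using hj
  | succ fuel ih =>
      intro j hj
      rw [pvRunEnd]
      split_ifs with h1 h2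
      · exact ih (j + 1) (by omega)
      · exact hj
      · exact hj

theorem pvRunEnd_stop (vl : List String) (name : String) (fuel : Nat) :
    ∀ j : Nat, vl.length - j ≤ fuel →
    ∀ h : pvRunEnd vl name fuel j < vl.length, vl[pvRunEnd vl name fuel j]'h ≠ name := by
  induction fuel with
  | zero =>
      intro j hfuel h
      rw [pvRunEnd] at h
      omega
  | succ fuel ih =>
      intro j hfuel
      rw [pvRunEnd]
      split_ifs with h1 h2
      · exact ih (j + 1) (by omega)
      · intro _; exact h2
      · intro h; exact absurd h h1

-- A's fold over one in-run index (state check_name already equals vl[j])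
theorem pvRunStep (vl : List String) (x : String) (s0 fin : Int) (res : PySem.Dict String (List Int))
    (j : Nat) (hj : j < vl.length) (hx : vl[j] = x) :
    (PySem.List.pyRange (j : Int) (vl.length : Int) 1).foldl (pvAStep vl) (x, s0, fin, res)
    = (PySem.List.pyRange ((j : Int) + 1) (vl.length : Int) 1).foldl (pvAStep vl)
        (x, s0, (j : Int), res.insert x [s0, (j : Int)]) := by
  rw [PySem.List.pyRange_one_cons (by exact_mod_cast hj)]
  have hget : PySem.List.pyGetD vl ((j : Nat) : Int) "" = x := by
    rw [PySem.List.pyGetD_natCast, List.getD_eq_getElem?_getD, List.getElem?_eq_getElem hj, hx]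
    rfl
  simp [pvAStep, hget]

-- A's fold absorbs a whole run in one dict entry
theorem pvRunAbsorb (vl : List String) (x : String) (s0 : Int) (fuel : Nat) :
    ∀ (j : Nat) (fin : Int) (res : PySem.Dict String (List Int)),
    j ≤ vl.length → vl.length - j ≤ fuel →
    (PySem.List.pyRange (j : Int) (vl.length : Int) 1).foldl (pvAStep vl) (x, s0, fin, res)
    = (PySem.List.pyRange ((pvRunEnd vl x fuel j : Nat) : Int) (vl.length : Int) 1).foldl (pvAStep vl)
        (x, s0,
         (if j < pvRunEnd vl x fuel j then ((pvRunEnd vl x fuel j : Int) - 1) else fin),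
         (if j < pvRunEnd vl x fuel j then res.insert x [s0, (pvRunEnd vl x fuel j : Int) - 1] else res)) := by
  induction fuel with
  | zero =>
      intro j fin res hj hfuel
      have : j = vl.length := by omega
      simp [pvRunEnd]
  | succ fuel ih =>
      intro j fin res hj hfuel
      by_cases h1 : j < vl.length
      · by_cases h2 : vl[j] = x
        · have hrec : pvRunEnd vl x (fuel + 1) j = pvRunEnd vl x fuel (j + 1) := by
            rw [pvRunEnd]; simp [h1, h2]
          rw [hrec, pvRunStep vl x s0 fin res j h1 h2]
          have hge : j + 1 ≤ pvRunEnd vl x fuel (j + 1) := pvRunEnd_ge vl x fuel (j + 1)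
          have hcast : ((j : Int) + 1) = (((j + 1 : Nat)) : Int) := by push_cast; ring
          rw [hcast, ih (j + 1) ((j : Int)) (res.insert x [s0, (j : Int)]) (by omega) (by omega)]
          by_cases hlt : j + 1 < pvRunEnd vl x fuel (j + 1)
          · simp only [if_pos hlt, if_pos (by omega : j < pvRunEnd vl x fuel (j + 1)),
              PySem.Dict.insert_insert_self]
          · have heq : pvRunEnd vl x fuel (j + 1) = j + 1 := by omega
            simp only [heq]
            norm_num
        · have hrec : pvRunEnd vl x (fuel + 1) j = j := by
            rw [pvRunEnd]; simp [h1, h2]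
          rw [hrec]; simp
      · have hrec : pvRunEnd vl x (fuel + 1) j = j := by
          rw [pvRunEnd]; simp [h1]
        rw [hrec]; simp

-- main loop correspondence: A's fold from index idx equals B's run loop, for any carried
-- state whose (check_name, start) pair is consistent with the convention at idx
theorem pvMain (vl : List String) (m : Nat) :
    ∀ (idx : Nat) (c : String) (s fin : Int) (res : PySem.Dict String (List Int)),
    idx ≤ vl.length → vl.length - idx ≤ m →
    (∀ h : idx < vl.length, c = vl[idx] → s = (idx : Int)) →
    ((PySem.List.pyRange (idx : Int) (vl.length : Int) 1).foldl (pvAStep vl) (c, s, fin, res)).2.2.2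
    = pvBLoop vl m idx res := by
  induction m with
  | zero =>
      intro idx c s fin res hle hm _
      have hidx : idx = vl.length := by omega
      simp [pvBLoop, hidx, PySem.List.pyRange_one_eq_nil (le_refl ((vl.length : Int)))]
  | succ m ih =>
      intro idx c s fin res hle hm hc
      by_cases hlt : idx < vl.length
      · -- one step at idx, then absorb the rest of the run
        have hget : PySem.List.pyGetD vl ((idx : Nat) : Int) "" = vl[idx] := by
          rw [PySem.List.pyGetD_natCast, List.getD_eq_getElem?_getD, List.getElem?_eq_getElem hlt]
          rfl
        have hstep :
            (PySem.List.pyRange (idx : Int) (vl.length : Int) 1).foldl (pvAStep vl) (c, s, fin, res)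
            = (PySem.List.pyRange ((idx : Int) + 1) (vl.length : Int) 1).foldl (pvAStep vl)
                (vl[idx], (idx : Int), (idx : Int), res.insert vl[idx] [(idx : Int), (idx : Int)]) := by
          rw [PySem.List.pyRange_one_cons (by exact_mod_cast hlt)]
          by_cases hcx : c = vl[idx]
          · have hs : s = (idx : Int) := hc hlt hcx
            simp [pvAStep, hget, hcx, hs]
          · simp [pvAStep, hget, hcx]
        rw [hstep]
        have hcast : ((idx : Int) + 1) = (((idx + 1 : Nat)) : Int) := by push_cast; ring
        rw [hcast, pvRunAbsorb vl (vl[idx]) ((idx : Int)) vl.length (idx + 1) ((idx : Int))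
              (res.insert vl[idx] [(idx : Int), (idx : Int)]) (by omega) (by omega)]
        set e := pvRunEnd vl vl[idx] vl.length (idx + 1) with he
        have hge : idx + 1 ≤ e := pvRunEnd_ge vl vl[idx] vl.length (idx + 1)
        have hlee : e ≤ vl.length := pvRunEnd_le vl vl[idx] vl.length (idx + 1) (by omega)
        have hstop : ∀ h : e < vl.length, vl[e]'h ≠ vl[idx] := by
          rw [he]; exact pvRunEnd_stop vl vl[idx] vl.length (idx + 1) (by omega)
        have hres :
            (if idx + 1 < e then (res.insert vl[idx] [(idx : Int), (idx : Int)]).insert vl[idx] [(idx : Int), (e : Int) - 1]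
             else res.insert vl[idx] [(idx : Int), (idx : Int)])
            = res.insert vl[idx] [(idx : Int), (e : Int) - 1] := by
          by_cases hlt2 : idx + 1 < e
          · simp [hlt2, PySem.Dict.insert_insert_self]
          · have : e = idx + 1 := by omega
            simp [this]
        rw [hres]
        have hrhs : pvBLoop vl (m + 1) idx res = pvBLoop vl m e (res.insert vl[idx] [(idx : Int), (e : Int) - 1]) := by
          rw [pvBLoop]; simp [hlt, ← he]
        rw [hrhs]
        apply ih e (vl[idx]) ((idx : Int)) _ _ hlee (by omega)
        intro h2 hcx2
        exact absurd hcx2.symm (hstop h2)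
      · have hidx : idx = vl.length := by omega
        simp [pvBLoop, hidx, PySem.List.pyRange_one_eq_nil (le_refl ((vl.length : Int)))]

-- ===== VERDICT (by name: the statement is the Claim_ definition above) =====
theorem get_variety_list_function_spec : Claim_equal_get_variety_list_function := by
  intro file _dom hpre
  unfold Spec_get_variety_list_function get_variety_list_function get_variety_list_function_alt
  cases hv : (PySem.Dict.mk file).get? "variety" with
  | none => rfl
  | some vl =>
      have hmain := pvMain vl vl.length 0 "" 0 0 PySem.Dict.empty (by omega) (by omega)
        (by intro _ _; rfl)
      simp only [Nat.cast_zero] at hmain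
      exact congrArg PySem.Dict.items hmain
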